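-- pv_equiv track=rewrite | github.com/milkyway21/DiffDynamic | batch_sampleandeval_parallel.py | build_fixed_schedule
-- ===== SOURCE A (Python) =====
-- def build_fixed_schedule(start_t, end_t, stride, num_timesteps):
--     """构建固定步长调度序列（从show_sampling_steps.py复制）"""
--     start_t = int(max(0, min(start_t, num_timesteps - 1)))
--     end_t = int(max(0, min(end_t, num_timesteps - 1)))
--     if start_t == end_t:
--         return [start_t], []
--
--     decreasing = start_t > end_t
--     step_sign = -1 if decreasing else 1
--     stride = max(1, int(stride))
--
--     indices = []
--     step_sizes = []
--     t = start_t
--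
--     while True:
--         indices.append(t)
--         if t == end_t:
--             break
--
--         t_next = t + step_sign * stride
--         step_sizes.append(stride)
--
--         if decreasing and t_next < end_t:
--             t_next = end_t
--         if not decreasing and t_next > end_t:
--             t_next = end_t
--
--         if t_next == t:
--             t_next = t + step_sign
--
--         t = int(max(0, min(t_next, num_timesteps - 1)))
--
--     return indices, step_sizes
-- ===== SOURCE B (Python) =====
-- def build_fixed_schedule(start_t, end_t, stride, num_timesteps):
--     hi = num_timesteps - 1
--     s = int(max(0, min(start_t, hi)))
--     e = int(max(0, min(end_t, hi)))
--     if s == e: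
--         return [s], []
--     step = max(1, int(stride))
--     sign = 1 if s < e else -1
--     indices = list(range(s, e, sign * step)) + [e]
--     return indices, [step] * (len(indices) - 1)
-- ===== Notes on version B (the rewrite author's own statement) =====
-- stated objective: simpler
-- what changed: Replaces A's stateful while-loop with clamp-and-dead-branch bookkeeping by a direct construction: indices = list(range(start, end, sign*stride)) + [end] and step_sizes = [stride]*(len(indices)-1).
import Mathlib
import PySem

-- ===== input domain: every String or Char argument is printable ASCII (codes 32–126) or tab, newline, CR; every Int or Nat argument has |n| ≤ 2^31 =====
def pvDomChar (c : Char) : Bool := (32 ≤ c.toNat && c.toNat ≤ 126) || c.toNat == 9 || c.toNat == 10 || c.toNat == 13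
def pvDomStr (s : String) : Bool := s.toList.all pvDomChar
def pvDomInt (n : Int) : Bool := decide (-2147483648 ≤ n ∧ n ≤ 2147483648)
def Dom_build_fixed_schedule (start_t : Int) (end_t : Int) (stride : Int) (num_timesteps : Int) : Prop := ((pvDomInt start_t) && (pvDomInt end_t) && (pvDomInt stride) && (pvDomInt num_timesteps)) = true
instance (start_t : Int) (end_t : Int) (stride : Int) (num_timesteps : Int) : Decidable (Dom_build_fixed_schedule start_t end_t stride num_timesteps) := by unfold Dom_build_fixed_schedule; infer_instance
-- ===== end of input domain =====

-- B builds the schedule directly as range(start,end,sign*stride)+[end] instead of A's stateful while-loop; objective: simpler (same cost).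

-- ===== PORT A =====
-- A's `while True` loop, step for step; `fuel` is a totality device only (the caller
-- supplies enough fuel for the loop to reach `end_t`, as proved below).
def bfsLoop (end_t : Int) (step_sign : Int) (stride : Int) (num_timesteps : Int)
    (decreasing : Bool) (fuel : Nat) (t : Int) : List Int × List Int :=
  match fuel with
  | 0 => ([], [])
  | fuel + 1 =>
    if t = end_t then ([t], [])
    else
      let t1 := t + step_sign * stride
      let t2 := if decreasing = true ∧ t1 < end_t then end_t else t1
      let t3 := if ¬ decreasing = true ∧ t2 > end_t then end_t else t2
      let t4 := if t3 = t then t + step_sign else t3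
      let t' := max 0 (min t4 (num_timesteps - 1))
      let r := bfsLoop end_t step_sign stride num_timesteps decreasing fuel t'
      (t :: r.1, stride :: r.2)

def build_fixed_schedule (start_t : Int) (end_t : Int) (stride : Int) (num_timesteps : Int) : List Int × List Int :=
  let s := max 0 (min start_t (num_timesteps - 1))
  let e := max 0 (min end_t (num_timesteps - 1))
  if s = e then ([s], [])
  else
    let decreasing := s > e
    let step_sign : Int := if decreasing then -1 else 1
    let stride' := max 1 stride
    bfsLoop e step_sign stride' num_timesteps (decide decreasing) ((s - e).natAbs + 1) s

-- ===== PORT B =====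
def build_fixed_schedule_alt (start_t : Int) (end_t : Int) (stride : Int) (num_timesteps : Int) : List Int × List Int :=
  let hi := num_timesteps - 1
  let s := max 0 (min start_t hi)
  let e := max 0 (min end_t hi)
  if s = e then ([s], [])
  else
    let step := max 1 stride
    let sign : Int := if s < e then 1 else -1
    let indices := PySem.List.pyRange s e (sign * step) ++ [e]
    (indices, List.replicate (indices.length - 1) step)

-- ===== PRECONDITION & SPEC =====
def Spec_build_fixed_schedule (start_t : Int) (end_t : Int) (stride : Int) (num_timesteps : Int) (out : List Int × List Int) : Prop := out = build_fixed_schedule_alt start_t end_t stride num_timesteps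
instance (start_t : Int) (end_t : Int) (stride : Int) (num_timesteps : Int) (out : List Int × List Int) : Decidable (Spec_build_fixed_schedule start_t end_t stride num_timesteps out) := by unfold Spec_build_fixed_schedule; infer_instance

-- ===== CLAIM (what is proved, stated in full; the proofs are below) =====
def Claim_equal_build_fixed_schedule : Prop := ∀ (start_t : Int) (end_t : Int) (stride : Int) (num_timesteps : Int), Dom_build_fixed_schedule start_t end_t stride num_timesteps → Spec_build_fixed_schedule start_t end_t stride num_timesteps (build_fixed_schedule start_t end_t stride num_timesteps)

-- ===== LEMMAS AND PROOFS =====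

lemma pyRange_nil_pos (a b s : Int) (hs : 0 < s) (h : b ≤ a) :
    PySem.List.pyRange a b s = [] := by
  rw [PySem.List.pyRange_of_pos a b hs]
  simp [if_neg (by omega : ¬ a < b)]

lemma pyRange_nil_neg (a b s : Int) (hs : 0 < s) (h : a ≤ b) :
    PySem.List.pyRange a b (-s) = [] := by
  rw [PySem.List.pyRange_of_neg a b (by omega : -s < 0)]
  simp [if_neg (by omega : ¬ b < a)]

lemma count_succ (a b s : Int) (hs : 0 < s) (h : a < b) :
    (b - a + s - 1) / s = (b - (a + s) + s - 1) / s + 1 := by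
  have h1 : b - a + s - 1 = (b - (a + s) + s - 1) + 1 * s := by ring
  rw [h1, Int.add_mul_ediv_right _ _ (by omega : s ≠ 0)]

lemma count_zero (x s : Int) (hs : 0 < s) (h0 : 0 ≤ x) (h1 : x < s) : x / s = 0 :=
  Int.ediv_eq_zero_of_lt h0 h1

lemma pyRange_cons_pos (a b s : Int) (hs : 0 < s) (h : a < b) :
    PySem.List.pyRange a b s = a :: PySem.List.pyRange (a + s) b s := by
  rw [PySem.List.pyRange_of_pos a b hs, PySem.List.pyRange_of_pos (a + s) b hs]
  rw [if_pos h]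
  by_cases h2 : a + s < b
  · rw [if_pos h2, count_succ a b s hs h]
    have hnn : 0 ≤ (b - (a + s) + s - 1) / s :=
      Int.ediv_nonneg (by omega) (by omega)
    rw [Int.toNat_add hnn (by omega), Int.toNat_one, List.range_succ_eq_map]
    simp only [List.map_cons, List.map_map]
    congr 1
    · push_cast; ring
    · apply List.map_congr_left
      intro k _
      simp only [Function.comp_apply]
      push_cast [Nat.succ_eq_add_one]
      ring
  · rw [if_neg h2]
    have hz : (b - (a + s) + s - 1) / s = 0 := count_zero _ _ hs (by omega) (by omega)
    rw [count_succ a b s hs h, hz]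
    simp

lemma pyRange_cons_neg (a b s : Int) (hs : 0 < s) (h : b < a) :
    PySem.List.pyRange a b (-s) = a :: PySem.List.pyRange (a - s) b (-s) := by
  have hneg : -s < 0 := by omega
  rw [PySem.List.pyRange_of_neg a b hneg, PySem.List.pyRange_of_neg (a - s) b hneg]
  rw [if_pos h]
  simp only [neg_neg]
  by_cases h2 : b < a - s
  · rw [if_pos h2]
    have hc : a - b + s - 1 = (a - s - b + s - 1) + 1 * s := by ring
    rw [hc, Int.add_mul_ediv_right _ _ (by omega : s ≠ 0)]
    have hnn : 0 ≤ (a - s - b + s - 1) / s :=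
      Int.ediv_nonneg (by omega) (by omega)
    rw [Int.toNat_add hnn (by omega), Int.toNat_one, List.range_succ_eq_map]
    simp only [List.map_cons, List.map_map]
    congr 1
    · push_cast; ring
    · apply List.map_congr_left
      intro k _
      simp only [Function.comp_apply]
      push_cast [Nat.succ_eq_add_one]
      ring
  · rw [if_neg h2]
    have hc : a - b + s - 1 = (a - b - 1) + 1 * s := by ring
    rw [hc, Int.add_mul_ediv_right _ _ (by omega : s ≠ 0)]
    have hz : (a - b - 1) / s = 0 := count_zero _ _ hs (by omega) (by omega)
    rw [hz]
    simp

-- A's loop, increasing case: it produces range(t, e, s) followed by e.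
lemma loop_inc (e s n : Int) (hs : 0 < s) (he : e ≤ n - 1) :
    ∀ (fuel : Nat) (t : Int), 0 ≤ t → t ≤ e → (e - t).toNat < fuel →
      bfsLoop e 1 s n false fuel t =
        (PySem.List.pyRange t e s ++ [e],
         List.replicate (PySem.List.pyRange t e s).length s) := by
  intro fuel
  induction fuel with
  | zero => intro t _ _ hf; omega
  | succ fuel ih =>
    intro t ht0 hte hf
    by_cases hend : t = e
    · rw [bfsLoop, if_pos hend, hend, pyRange_nil_pos e e s hs le_rfl]
      simp
    · have hlt : t < e := lt_of_le_of_ne hte hend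
      rw [bfsLoop, if_neg hend]
      simp only [one_mul, Bool.false_eq_true, false_and, if_false, not_false_iff, true_and]
      by_cases hov : t + s > e
      · rw [if_pos hov, if_neg (by omega : ¬ e = t)]
        have hcl : max 0 (min e (n - 1)) = e := by omega
        rw [hcl, ih e (by omega) le_rfl (by omega)]
        rw [pyRange_cons_pos t e s hs hlt, pyRange_nil_pos (t + s) e s hs (by omega),
            pyRange_nil_pos e e s hs le_rfl]
        simp
      · rw [if_neg hov, if_neg (by omega : ¬ t + s = t)]
        have hcl : max 0 (min (t + s) (n - 1)) = t + s := by omega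
        rw [hcl, ih (t + s) (by omega) (by omega) (by omega)]
        rw [pyRange_cons_pos t e s hs hlt]
        simp [List.replicate_succ]

-- A's loop, decreasing case: it produces range(t, e, -s) followed by e.
lemma loop_dec (e s n : Int) (hs : 0 < s) :
    ∀ (fuel : Nat) (t : Int), 0 ≤ e → e ≤ t → t ≤ n - 1 → (t - e).toNat < fuel →
      bfsLoop e (-1) s n true fuel t =
        (PySem.List.pyRange t e (-s) ++ [e],
         List.replicate (PySem.List.pyRange t e (-s)).length s) := by
  intro fuel
  induction fuel with
  | zero => intro t _ _ _ hf; omega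
  | succ fuel ih =>
    intro t he0 het htn hf
    by_cases hend : t = e
    · rw [bfsLoop, if_pos hend, hend, pyRange_nil_neg e e s hs le_rfl]
      simp
    · have hlt : e < t := lt_of_le_of_ne het (fun h => hend h.symm)
      rw [bfsLoop, if_neg hend]
      have hstep : t + -1 * s = t - s := by ring
      simp only [hstep, true_and, not_true, false_and, if_false]
      by_cases hov : t - s < e
      · rw [if_pos hov, if_neg (by omega : ¬ e = t)]
        have hcl : max 0 (min e (n - 1)) = e := by omega
        rw [hcl, ih e he0 le_rfl (by omega) (by omega)]
        rw [pyRange_cons_neg t e s hs hlt, pyRange_nil_neg (t - s) e s hs (by omega),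
            pyRange_nil_neg e e s hs le_rfl]
        simp
      · rw [if_neg hov, if_neg (by omega : ¬ t - s = t)]
        have hcl : max 0 (min (t - s) (n - 1)) = t - s := by omega
        rw [hcl, ih (t - s) he0 (by omega) (by omega) (by omega)]
        rw [pyRange_cons_neg t e s hs hlt]
        simp [List.replicate_succ]

-- ===== VERDICT (by name: the statement is the Claim_ definition above) =====
theorem build_fixed_schedule_spec : Claim_equal_build_fixed_schedule := by
  intro start_t end_t stride num_timesteps _
  unfold Spec_build_fixed_schedule build_fixed_schedule build_fixed_schedule_alt
  simp only []
  set n := num_timesteps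
  set s := max 0 (min start_t (n - 1)) with hs_def
  set e := max 0 (min end_t (n - 1)) with he_def
  by_cases heq : s = e
  · simp [heq]
  · rw [if_neg heq, if_neg heq]
    have hn : 1 ≤ n := by
      by_contra h
      apply heq
      omega
    have hs0 : 0 ≤ s := le_max_left _ _
    have hs1 : s ≤ n - 1 := by omega
    have he0 : 0 ≤ e := le_max_left _ _
    have he1 : e ≤ n - 1 := by omega
    have hstride : 0 < max 1 stride := by omega
    by_cases hlt : s < e
    · have hdec : ¬ s > e := by omega
      rw [if_neg hdec, if_pos hlt]
      rw [decide_eq_false hdec]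
      rw [loop_inc e (max 1 stride) n hstride he1 ((s - e).natAbs + 1) s hs0 (by omega)
            (by omega)]
      simp
    · have hgt : s > e := by omega
      rw [if_pos hgt, if_neg hlt]
      rw [decide_eq_true hgt]
      have hneg : (-1 : Int) * max 1 stride = -(max 1 stride) := by ring
      rw [loop_dec e (max 1 stride) n hstride ((s - e).natAbs + 1) s he0 (by omega)
            hs1 (by omega), hneg]
      simp
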